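-- pv_equiv track=rewrite | github.com/BG1992/miscellaneous | gekitai_helper.py | line3_check
-- ===== SOURCE A (Python) =====
-- lines3 = [[[1,0],[2,0]], [[1,0],[-1,0]], [[-1,0],[-2,0]], [[0,1],[0,2]], [[0,1],[0,-1]], [[0,-1],[0,-2]],
--             [[1,1],[-1,-1]], [[1,1],[2,2]], [[-1,-1], [-2,-2]], [[-1,1],[-2,2]], [[-1,1],[1,-1]], [[1,-1], [2,-2]]]
--
-- def line3_check(square, white, black):
--     if square in white:
--         color = 1
--     else:
--         color = 0
--     for line in lines3:
--         is_3 = True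
--         for vec in line:
--             if square[0] + vec[0] >= 0 and square[0] + vec[0] <= 5 and square[1] + vec[1] >= 0 and square[1] + vec[1] <= 5:
--                 if color == 1:
--                     if (square[0] + vec[0], square[1] + vec[1]) not in white:
--                         is_3 = False
--                         break
--                 else:
--                     if (square[0] + vec[0], square[1] + vec[1]) not in black:
--                         is_3 = False
--                         break
--             else:
--                 is_3 = False
--                 break
--         if is_3: return True
--     return False
-- ===== SOURCE B (Python) =====
-- def line3_check(square, white, black):
--     target = white if square in white else black
--
--     def present(dx, dy):
--         x, y = square[0] + dx, square[1] + dy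
--         return 0 <= x <= 5 and 0 <= y <= 5 and (x, y) in target
--
--     def run(dx, dy):
--         if not present(dx, dy):
--             return 0
--         return 2 if present(2 * dx, 2 * dy) else 1
--
--     for dx, dy in ((1, 0), (0, 1), (1, 1), (1, -1)):
--         if run(dx, dy) + run(-dx, -dy) >= 2:
--             return True
--     return False
-- ===== Notes on version B (the rewrite author's own statement) =====
-- stated objective: alternative
-- what changed: Replaced A's enumeration of 12 precomputed two-offset line patterns by an outward two-way scan along the 4 directions, summing consecutive hits in both orientations and testing 1+forward+backward >= 3.
import Mathlib
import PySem

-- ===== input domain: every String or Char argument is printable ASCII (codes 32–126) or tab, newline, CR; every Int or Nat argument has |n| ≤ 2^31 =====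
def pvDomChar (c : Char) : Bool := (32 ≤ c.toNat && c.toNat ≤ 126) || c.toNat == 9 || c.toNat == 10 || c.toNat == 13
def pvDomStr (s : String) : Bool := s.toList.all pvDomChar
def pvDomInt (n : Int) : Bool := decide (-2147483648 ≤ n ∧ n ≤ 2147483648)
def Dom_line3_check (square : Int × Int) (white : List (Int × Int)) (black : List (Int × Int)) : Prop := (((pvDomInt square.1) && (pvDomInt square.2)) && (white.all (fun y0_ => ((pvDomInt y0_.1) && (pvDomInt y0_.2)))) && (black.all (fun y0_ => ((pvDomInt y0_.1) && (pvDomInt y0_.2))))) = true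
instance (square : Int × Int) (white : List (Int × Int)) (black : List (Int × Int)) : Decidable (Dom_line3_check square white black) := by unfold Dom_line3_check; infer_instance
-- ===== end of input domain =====

-- B replaces A's table of 12 two-offset line patterns by an outward two-way scan
-- along the 4 directions (objective: alternative decomposition, same cost).

-- ===== PORT A =====
-- the module constant lines3 (each [dx,dy] pair ported as Int × Int)
def lines3 : List (List (Int × Int)) :=
  [[(1,0),(2,0)], [(1,0),(-1,0)], [(-1,0),(-2,0)], [(0,1),(0,2)], [(0,1),(0,-1)], [(0,-1),(0,-2)],
   [(1,1),(-1,-1)], [(1,1),(2,2)], [(-1,-1),(-2,-2)], [(-1,1),(-2,2)], [(-1,1),(1,-1)], [(1,-1),(2,-2)]]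

-- inner 'for vec in line' loop with its break (is_3 accumulator)
def lineIs3A (square : Int × Int) (white black : List (Int × Int)) (color : Int) : List (Int × Int) → Bool
  | [] => true
  | vec :: rest =>
    if square.1 + vec.1 ≥ 0 ∧ square.1 + vec.1 ≤ 5 ∧ square.2 + vec.2 ≥ 0 ∧ square.2 + vec.2 ≤ 5 then
      if color = 1 then
        if (square.1 + vec.1, square.2 + vec.2) ∉ white then false
        else lineIs3A square white black color rest
      else
        if (square.1 + vec.1, square.2 + vec.2) ∉ black then false
        else lineIs3A square white black color rest
    else false

-- outer 'for line in lines3' loop with its early return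
def linesLoopA (square : Int × Int) (white black : List (Int × Int)) (color : Int) : List (List (Int × Int)) → Bool
  | [] => false
  | line :: rest =>
    if lineIs3A square white black color line then true
    else linesLoopA square white black color rest

def line3_check (square : Int × Int) (white : List (Int × Int)) (black : List (Int × Int)) : Bool :=
  let color : Int := if square ∈ white then 1 else 0
  linesLoopA square white black color lines3

-- ===== PORT B =====
def presentB (square : Int × Int) (target : List (Int × Int)) (dx dy : Int) : Bool :=
  decide (0 ≤ square.1 + dx ∧ square.1 + dx ≤ 5 ∧ 0 ≤ square.2 + dy ∧ square.2 + dy ≤ 5 ∧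
          (square.1 + dx, square.2 + dy) ∈ target)

def runB (square : Int × Int) (target : List (Int × Int)) (dx dy : Int) : Int :=
  if ¬ presentB square target dx dy then 0
  else if presentB square target (2*dx) (2*dy) then 2 else 1

-- 'for dx, dy in dirs' loop with its early return
def dirsLoopB (square : Int × Int) (target : List (Int × Int)) : List (Int × Int) → Bool
  | [] => false
  | (dx, dy) :: rest =>
    if runB square target dx dy + runB square target (-dx) (-dy) ≥ 2 then true
    else dirsLoopB square target rest

def line3_check_alt (square : Int × Int) (white : List (Int × Int)) (black : List (Int × Int)) : Bool :=
  let target := if square ∈ white then white else black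
  dirsLoopB square target [(1,0),(0,1),(1,1),(1,-1)]

-- ===== PRECONDITION & SPEC =====
def Spec_line3_check (square : Int × Int) (white : List (Int × Int)) (black : List (Int × Int)) (out : Bool) : Prop := out = line3_check_alt square white black
instance (square : Int × Int) (white : List (Int × Int)) (black : List (Int × Int)) (out : Bool) : Decidable (Spec_line3_check square white black out) := by unfold Spec_line3_check; infer_instance

-- ===== CLAIM (what is proved, stated in full; the proofs are below) =====
def Claim_equal_line3_check : Prop := ∀ (square : Int × Int) (white : List (Int × Int)) (black : List (Int × Int)), Dom_line3_check square white black → Spec_line3_check square white black (line3_check square white black)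

-- ===== LEMMAS AND PROOFS =====

-- one offset test of A, with the color already resolved to the target set
def hitT (square : Int × Int) (target : List (Int × Int)) (v : Int × Int) : Bool :=
  decide (square.1 + v.1 ≥ 0 ∧ square.1 + v.1 ≤ 5 ∧ square.2 + v.2 ≥ 0 ∧ square.2 + v.2 ≤ 5 ∧
          (square.1 + v.1, square.2 + v.2) ∈ target)

lemma lineIs3A_pair (square : Int × Int) (white black : List (Int × Int))
    (a b : Int × Int) :
    lineIs3A square white black (if square ∈ white then 1 else 0) [a, b]
      = (hitT square (if square ∈ white then white else black) a
         && hitT square (if square ∈ white then white else black) b) := by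
  by_cases h : square ∈ white <;>
    simp only [h, if_pos, lineIs3A, hitT] <;>
    split_ifs <;> simp_all

lemma hitT_present (square : Int × Int) (target : List (Int × Int)) (dx dy : Int) :
    hitT square target (dx, dy) = presentB square target dx dy := by
  simp [hitT, presentB]

-- ===== VERDICT (by name: the statement is the Claim_ definition above) =====
theorem line3_check_spec : Claim_equal_line3_check := by
  intro square white black _
  unfold Spec_line3_check line3_check line3_check_alt
  simp only [linesLoopA, lines3, lineIs3A_pair, hitT_present, dirsLoopB, runB]
  norm_num
  generalize presentB square (if square ∈ white then white else black) 1 0 = p0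
  generalize presentB square (if square ∈ white then white else black) 2 0 = p1
  generalize presentB square (if square ∈ white then white else black) (-1) 0 = p2
  generalize presentB square (if square ∈ white then white else black) (-2) 0 = p3
  generalize presentB square (if square ∈ white then white else black) 0 1 = p4
  generalize presentB square (if square ∈ white then white else black) 0 2 = p5
  generalize presentB square (if square ∈ white then white else black) 0 (-1) = p6
  generalize presentB square (if square ∈ white then white else black) 0 (-2) = p7
  generalize presentB square (if square ∈ white then white else black) 1 1 = p8
  generalize presentB square (if square ∈ white then white else black) 2 2 = p9
  generalize presentB square (if square ∈ white then white else black) (-1) (-1) = p10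
  generalize presentB square (if square ∈ white then white else black) (-2) (-2) = p11
  generalize presentB square (if square ∈ white then white else black) (-1) 1 = p12
  generalize presentB square (if square ∈ white then white else black) (-2) 2 = p13
  generalize presentB square (if square ∈ white then white else black) 1 (-1) = p14
  generalize presentB square (if square ∈ white then white else black) 2 (-2) = p15
  revert p0 p1 p2 p3 p4 p5 p6 p7 p8 p9 p10 p11 p12 p13 p14 p15
  decide
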